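-- pv_equiv track=rewrite | github.com/rafaelGuasselli/exercicios | beecrowd/1125.py | acharCampeoes
-- ===== SOURCE A (Python) =====
-- def acharCampeoes(pontos):
-- 	campeoes = []
--
-- 	for i in range(1, len(pontos)+1):
-- 		campeoes.append(pontos[i-1][1])
-- 		if i < len(pontos) and pontos[i-1][0] > pontos[i][0]:
-- 			break
-- 	campeoes.sort()
-- 	return campeoes
-- ===== SOURCE B (Python) =====
-- def acharCampeoes(pontos):
-- 	# Recursive decomposition: compute the champions of the tail (empty if the
-- 	# score drops right after the head), then insert the head's name into that
-- 	# already-sorted result in place (insertion sort), so no final sort is needed.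
-- 	if not pontos:
-- 		return []
-- 	name = pontos[0][1]
-- 	if len(pontos) > 1 and pontos[0][0] > pontos[1][0]:
-- 		rest = []
-- 	else:
-- 		rest = acharCampeoes(pontos[1:])
-- 	k = 0
-- 	while k < len(rest) and rest[k] < name:
-- 		k += 1
-- 	return rest[:k] + [name] + rest[k:]
-- ===== Notes on version B (the rewrite author's own statement) =====
-- stated objective: alternative
-- what changed: Replaces A's iterative append-then-break loop followed by a library sort with a structural recursion that builds the answer directly: the champions of the tail are computed recursively (cut to empty when the score drops after the head) and the head's name is insertion-inserted into that already-sorted list, so no separate sort pass exists.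
import Mathlib
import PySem

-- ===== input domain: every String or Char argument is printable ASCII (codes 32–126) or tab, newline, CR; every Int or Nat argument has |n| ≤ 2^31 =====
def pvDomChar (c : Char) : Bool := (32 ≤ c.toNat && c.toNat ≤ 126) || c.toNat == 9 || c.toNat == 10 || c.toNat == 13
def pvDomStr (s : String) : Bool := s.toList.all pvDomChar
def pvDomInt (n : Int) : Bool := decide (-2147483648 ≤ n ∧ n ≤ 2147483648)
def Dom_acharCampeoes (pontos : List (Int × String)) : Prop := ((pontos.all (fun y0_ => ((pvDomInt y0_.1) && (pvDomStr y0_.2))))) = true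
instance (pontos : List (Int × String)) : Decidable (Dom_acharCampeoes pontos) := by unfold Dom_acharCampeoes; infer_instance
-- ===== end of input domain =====

-- B replaces A's loop-with-break plus final sort by a structural recursion that
-- inserts each kept name into the already-sorted recursive result (alternative, same behaviour).

-- ===== PORT A =====
-- the for-loop with break: append the name, stop after the first strict descent
def acharCampeoesGo : List (Int × String) → List String
  | [] => []
  | p :: rest =>
    p.2 :: (match rest with
      | [] => []
      | q :: _ => if p.1 > q.1 then [] else acharCampeoesGo rest)

def acharCampeoes (pontos : List (Int × String)) : List String :=
  PySem.List.sorted (acharCampeoesGo pontos) (fun x => x) false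

-- ===== PORT B =====
-- the while loop scanning for the insertion point: rest[:k] + [name] + rest[k:]
def insertName (name : String) : List String → List String
  | [] => [name]
  | y :: ys => if y < name then y :: insertName name ys else name :: y :: ys

def acharCampeoes_alt : List (Int × String) → List String
  | [] => []
  | p :: rest =>
    let tail : List String :=
      match rest with
      | q :: _ => if p.1 > q.1 then [] else acharCampeoes_alt rest
      | [] => acharCampeoes_alt rest
    insertName p.2 tail

-- ===== PRECONDITION & SPEC =====
def Spec_acharCampeoes (pontos : List (Int × String)) (out : List String) : Prop := out = acharCampeoes_alt pontos
instance (pontos : List (Int × String)) (out : List String) : Decidable (Spec_acharCampeoes pontos out) := by unfold Spec_acharCampeoes; infer_instance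

-- ===== CLAIM (what is proved, stated in full; the proofs are below) =====
def Claim_equal_acharCampeoes : Prop := ∀ (pontos : List (Int × String)), Dom_acharCampeoes pontos → Spec_acharCampeoes pontos (acharCampeoes pontos)

-- ===== LEMMAS AND PROOFS =====
theorem insertName_perm (x : String) (l : List String) :
    (insertName x l).Perm (x :: l) := by
  induction l with
  | nil => simp [insertName]
  | cons y ys ih =>
    by_cases h : y < x
    · simp only [insertName, if_pos h]
      exact (ih.cons y).trans (List.Perm.swap x y ys)
    · simp only [insertName]; rw [if_neg h]

theorem insertName_pairwise (x : String) (l : List String)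
    (hl : l.Pairwise (· ≤ ·)) : (insertName x l).Pairwise (· ≤ ·) := by
  induction l with
  | nil => simp [insertName]
  | cons y ys ih =>
    rcases List.pairwise_cons.mp hl with ⟨hy, hys⟩
    by_cases h : y < x
    · simp only [insertName, if_pos h]
      refine List.pairwise_cons.mpr ⟨?_, ih hys⟩
      intro z hz
      rcases List.mem_cons.mp (((insertName_perm x ys).mem_iff).mp hz) with rfl | hz
      · exact le_of_lt h
      · exact hy z hz
    · simp only [insertName, if_neg h]
      refine List.pairwise_cons.mpr ⟨?_, hl⟩
      intro z hz
      rcases List.mem_cons.mp hz with rfl | hz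
      · exact le_of_not_gt h
      · exact le_trans (le_of_not_gt h) (hy z hz)

theorem alt_perm_go (xs : List (Int × String)) :
    (acharCampeoes_alt xs).Perm (acharCampeoesGo xs) := by
  induction xs with
  | nil => simp [acharCampeoes_alt, acharCampeoesGo]
  | cons p rest ih =>
    cases rest with
    | nil =>
      simp [acharCampeoes_alt, acharCampeoesGo, insertName]
    | cons q t =>
      by_cases h : p.1 > q.1
      · simp [acharCampeoes_alt, acharCampeoesGo, h, insertName]
      · have h1 : acharCampeoes_alt (p :: q :: t)
            = insertName p.2 (acharCampeoes_alt (q :: t)) := by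
          simp only [acharCampeoes_alt]; rw [if_neg h]
        have h2 : acharCampeoesGo (p :: q :: t)
            = p.2 :: acharCampeoesGo (q :: t) := by
          simp only [acharCampeoesGo]; rw [if_neg h]
        rw [h1, h2]
        exact (insertName_perm _ _).trans (ih.cons p.2)

theorem alt_pairwise (xs : List (Int × String)) :
    (acharCampeoes_alt xs).Pairwise (· ≤ ·) := by
  induction xs with
  | nil => simp [acharCampeoes_alt]
  | cons p rest ih =>
    cases rest with
    | nil => simp [acharCampeoes_alt, insertName]
    | cons q t =>
      by_cases h : p.1 > q.1
      · simp [acharCampeoes_alt, h, insertName]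
      · have h1 : acharCampeoes_alt (p :: q :: t)
            = insertName p.2 (acharCampeoes_alt (q :: t)) := by
          simp only [acharCampeoes_alt]; rw [if_neg h]
        rw [h1]
        exact insertName_pairwise _ _ ih

-- ===== VERDICT (by name: the statement is the Claim_ definition above) =====
theorem acharCampeoes_spec : Claim_equal_acharCampeoes := by
  intro pontos _
  unfold Spec_acharCampeoes acharCampeoes
  exact PySem.List.sorted_id_eq_of_perm_of_pairwise _ _
    (alt_perm_go pontos) (alt_pairwise pontos)
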